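-- pv_equiv track=rewrite | github.com/habvi/atcoder | ABC/214/F_Substrings.py | right_leftmost_idx
-- ===== SOURCE A (Python) =====
-- def right_leftmost_idx(S):
--     def stoi(s):
--         return ord(s) - ord('a')
--
--     n = len(S)
--     idx = [[n] * 26 for _ in range(n + 1)]
--     for i in reversed(range(n)):
--         for alph in range(26):
--             if stoi(S[i]) == alph:
--                 idx[i][alph] = i
--             else:
--                 idx[i][alph] = idx[i + 1][alph]
--     return idx
-- ===== SOURCE B (Python) =====
-- def right_leftmost_idx(S):
--     # Direct definition: cell (i, a) is the position of the first occurrence of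
--     # letter a at or after i (found with str.find), or n if there is none.
--     n = len(S)
--     table = []
--     for i in range(n + 1):
--         row = []
--         for a in range(26):
--             p = S.find(chr(ord('a') + a), i)
--             row.append(n if p == -1 else p)
--         table.append(row)
--     return table
-- ===== Notes on version B (the rewrite author's own statement) =====
-- stated objective: simpler
-- what changed: B drops A's backward dynamic-programming table propagation entirely and computes every cell independently as the first occurrence of that letter at-or-after the row index via the library substring search str.find(c, i).
import Mathlib
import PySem

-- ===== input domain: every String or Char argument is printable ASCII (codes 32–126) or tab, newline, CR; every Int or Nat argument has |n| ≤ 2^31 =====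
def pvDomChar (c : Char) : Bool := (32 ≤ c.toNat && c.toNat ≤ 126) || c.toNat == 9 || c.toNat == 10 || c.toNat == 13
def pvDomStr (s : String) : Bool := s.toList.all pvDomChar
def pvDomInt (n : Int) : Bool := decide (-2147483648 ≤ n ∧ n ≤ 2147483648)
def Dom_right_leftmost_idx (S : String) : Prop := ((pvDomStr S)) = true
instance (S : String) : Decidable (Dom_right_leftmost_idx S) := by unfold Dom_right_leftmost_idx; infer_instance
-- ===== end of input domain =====

-- B replaces A's backward DP table propagation by a direct, stateless definition of
-- each cell: the first occurrence of the letter at-or-after the row index via str.find.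

-- ===== PORT A =====
-- stoi(s) = ord(s) - ord('a')
def pvCode (c : Char) : Int := (c.toNat : Int) - 97

-- pairs (i, S[i]) in order; the loop 'for i in reversed(range(n))' reads S[i] at each index
def pvEnum (i : Int) : List Char → List (Int × Char)
  | [] => []
  | c :: t => (i, c) :: pvEnum (i + 1) t

-- the downward loop: row i is computed from row i+1 (the head of the rows already built);
-- rows 0..n-1 of the initial [[n]*26] table are always fully overwritten, only row n survives
def pvRowsA (n : Int) : List (Int × Char) → List (List Int)
  | [] => [List.replicate 26 n]
  | (i, c) :: t =>
      let rest := pvRowsA n t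
      ((List.range 26).map (fun (a : Nat) =>
        if pvCode c = (a : Int) then i else (rest.headD []).getD a 0)) :: rest

def right_leftmost_idx (S : String) : List (List Int) :=
  pvRowsA (S.toList.length : Int) (pvEnum 0 S.toList)

-- ===== PORT B =====
-- 'for i in range(n+1): for a in range(26): p = S.find(chr(ord('a')+a), i); append(n if p == -1 else p)'
def right_leftmost_idx_alt (S : String) : List (List Int) :=
  let n : Nat := S.toList.length
  (List.range (n + 1)).map (fun i : Nat =>
    (List.range 26).map (fun a : Nat =>
      let p : Int := PySem.Str.findFrom S (String.ofList [Char.ofNat (97 + a)]) (i : Int) none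
      if p = -1 then (n : Int) else p))

-- ===== PRECONDITION & SPEC =====
def Spec_right_leftmost_idx (S : String) (out : List (List Int)) : Prop := out = right_leftmost_idx_alt S
instance (S : String) (out : List (List Int)) : Decidable (Spec_right_leftmost_idx S out) := by unfold Spec_right_leftmost_idx; infer_instance

-- ===== CLAIM (what is proved, stated in full; the proofs are below) =====
def Claim_equal_right_leftmost_idx : Prop := ∀ (S : String), Dom_right_leftmost_idx S → Spec_right_leftmost_idx S (right_leftmost_idx S)

-- ===== LEMMAS AND PROOFS =====

-- reference value: first index i in t with pvCode S[i] = a, else n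
def pvG (n a : Int) : List (Int × Char) → Int
  | [] => n
  | (i, c) :: t => if pvCode c = a then i else pvG n a t

-- reference row after the first k letters have been processed
def pvSRow (n : Int) (k : Nat) (t : List (Int × Char)) : List Int :=
  (List.range 26).map (fun a => if a < k then pvG n (a : Int) t else n)

-- reference table: one row per suffix of t, plus the sentinel row
def pvSTab (n : Int) (k : Nat) : List (Int × Char) → List (List Int)
  | [] => [pvSRow n k []]
  | p :: t => pvSRow n k (p :: t) :: pvSTab n k t

theorem pvSRow_nil (n : Int) (k : Nat) : pvSRow n k [] = List.replicate 26 n := by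
  simp [pvSRow, pvG]

theorem pvSTab_headD (n : Int) (k : Nat) (t : List (Int × Char)) :
    (pvSTab n k t).headD [] = pvSRow n k t := by
  cases t <;> rfl

theorem pvSRow_getD (n : Int) (k : Nat) (t : List (Int × Char)) (a : Nat) (h : a < 26) :
    (pvSRow n k t).getD a 0 = if a < k then pvG n (a : Int) t else n := by
  simp [pvSRow, List.getD, h]

theorem pvRowsA_eq (n : Int) (t : List (Int × Char)) : pvRowsA n t = pvSTab n 26 t := by
  induction t with
  | nil => simp [pvRowsA, pvSTab, pvSRow_nil]
  | cons p t ih =>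
      obtain ⟨i, c⟩ := p
      simp only [pvRowsA, pvSTab, ih, pvSTab_headD]
      refine congrArg₂ List.cons ?_ rfl
      apply List.map_congr_left
      intro a ha
      have h26 : a < 26 := List.mem_range.mp ha
      rw [pvSRow_getD n 26 t a h26]
      simp [pvG, h26]

-- the table as a map over row indices 0..len, each row built from the corresponding suffix
theorem pvSTab_eq_map (n : Int) (l : List Char) (i : Int) :
    pvSTab n 26 (pvEnum i l) =
      (List.range (l.length + 1)).map
        (fun k : Nat => pvSRow n 26 (pvEnum (i + (k : Int)) (l.drop k))) := by
  induction l generalizing i with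
  | nil => simp [pvEnum, pvSTab, List.range_succ]
  | cons c t ih =>
      conv_rhs => rw [List.range_succ_eq_map]
      simp only [List.map_cons, List.map_map, pvEnum, pvSTab]
      congr 1
      · norm_num [pvEnum]
      rw [ih (i + 1)]
      apply List.map_congr_left
      intro k _
      have : i + 1 + (k : Int) = i + ((k + 1 : Nat) : Int) := by push_cast; ring
      simp [Function.comp, this]

-- singleton prefix
theorem pvSingleton_prefix (c : Char) (m : List Char) :
    [c] <+: m ↔ m.head? = some c := by
  cases m with
  | nil => simp
  | cons x t =>
      constructor
      · intro h
        rcases h with ⟨r, hr⟩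
        simp at hr
        simp [hr.1]
      · intro h
        simp at h
        exact ⟨t, by simp [h]⟩

-- singleton infix = membership
theorem pvSingleton_infix (c : Char) (m : List Char) :
    [c] <:+: m ↔ c ∈ m := by
  constructor
  · intro h
    exact (List.singleton_sublist).mp h.sublist
  · intro h
    rcases List.append_of_mem h with ⟨s, t, rfl⟩
    exact ⟨s, t, by simp⟩

-- how Chars.find on a single-character needle unfolds over a cons
theorem pvFind_cons (ch c : Char) (l : List Char) :
    PySem.Chars.find (ch :: l) [c] =
      if ch = c then 0
      else if PySem.Chars.find l [c] = -1 then -1 else 1 + PySem.Chars.find l [c] := by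
  by_cases hc : ch = c
  · subst hc
    have hinf : [ch] <:+: (ch :: l) := (pvSingleton_infix ch _).mpr (by simp)
    have h0 : 0 ≤ PySem.Chars.find (ch :: l) [ch] := (PySem.Chars.find_nonneg_iff _ _).mpr hinf
    obtain ⟨hpre, hmin⟩ := PySem.Chars.find_spec h0
    have : (PySem.Chars.find (ch :: l) [ch]).toNat = 0 := by
      by_contra hne
      have := hmin 0 (Nat.pos_of_ne_zero hne)
      exact this ((pvSingleton_prefix ch _).mpr (by simp))
    rw [if_pos rfl]
    omega
  · rw [if_neg hc]
    by_cases hl : PySem.Chars.find l [c] = -1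
    · rw [if_pos hl]
      apply (PySem.Chars.find_eq_neg_one_iff _ _).mpr
      intro hinf
      rcases List.mem_cons.mp ((pvSingleton_infix c _).mp hinf) with h | h
      · exact hc h.symm
      · exact ((PySem.Chars.find_eq_neg_one_iff _ _).mp hl) ((pvSingleton_infix c _).mpr h)
    · rw [if_neg hl]
      have hj0 : 0 ≤ PySem.Chars.find l [c] := by
        have := PySem.Chars.neg_one_le_find l [c]
        omega
      obtain ⟨hjp, hjm⟩ := PySem.Chars.find_spec hj0
      set j := (PySem.Chars.find l [c]).toNat with hjdef
      have hinf : [c] <:+: (ch :: l) := by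
        apply (pvSingleton_infix c _).mpr
        have : c ∈ l := (pvSingleton_infix c _).mp ((PySem.Chars.find_ne_neg_one_iff _ _).mp hl)
        simp [this]
      have hF0 : 0 ≤ PySem.Chars.find (ch :: l) [c] := (PySem.Chars.find_nonneg_iff _ _).mpr hinf
      obtain ⟨hFp, hFm⟩ := PySem.Chars.find_spec hF0
      set F := (PySem.Chars.find (ch :: l) [c]).toNat with hFdef
      have hle : F ≤ j + 1 := by
        by_contra hgt
        exact hFm (j + 1) (by omega) (by simpa using hjp)
      have hFne0 : F ≠ 0 := by
        intro h0
        rw [h0] at hFp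
        simp only [List.drop_zero] at hFp
        have := (pvSingleton_prefix c (ch :: l)).mp hFp
        simp only [List.head?_cons, Option.some.injEq] at this
        exact hc this
      have hge : j + 1 ≤ F := by
        obtain ⟨m, hm⟩ : ∃ m, F = m + 1 := ⟨F - 1, by omega⟩
        have hpm : [c] <+: l.drop m := by
          have := hFp
          rw [hm] at this
          simpa using this
        have : j ≤ m := by
          by_contra hlt
          exact hjm m (by omega) hpm
        omega
      have : F = j + 1 := by omega
      omega

-- B's per-cell search equals the reference pvG over the corresponding suffix
theorem pvG_eq_find (c : Char) (a : Int) (hc : ∀ ch : Char, pvCode ch = a ↔ ch = c) :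
    ∀ (l : List Char) (i n : Int), n = i + l.length →
      pvG n a (pvEnum i l) =
        (if PySem.Chars.find l [c] = -1 then n else i + PySem.Chars.find l [c]) := by
  intro l
  induction l with
  | nil =>
      intro i n hn
      have : PySem.Chars.find ([] : List Char) [c] = -1 := by
        apply (PySem.Chars.find_eq_neg_one_iff _ _).mpr
        intro h
        have := (pvSingleton_infix c _).mp h
        simp at this
      simp [pvEnum, pvG, this]
  | cons ch t ih =>
      intro i n hn
      simp only [pvEnum, pvG, pvFind_cons]
      by_cases hch : ch = c
      · rw [if_pos ((hc ch).mpr hch), if_pos hch]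
        simp
      · rw [if_neg (fun h => hch ((hc ch).mp h)), if_neg hch]
        rw [ih (i + 1) n (by simp at hn ⊢; omega)]
        by_cases ht : PySem.Chars.find t [c] = -1
        · simp [ht]
        · simp only [if_neg ht]
          rw [if_neg (by have := PySem.Chars.neg_one_le_find t [c]; omega)]
          ring

-- the coding test in A picks out exactly letter chr(97+a)
theorem pvCode_iff (a : Nat) (ha : a < 26) (ch : Char) :
    pvCode ch = (a : Int) ↔ ch = Char.ofNat (97 + a) := by
  have hv : (Char.ofNat (97 + a)).toNat = 97 + a := by
    rw [Char.toNat_ofNat, if_pos]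
    exact Or.inl (by omega)
  unfold pvCode
  constructor
  · intro h
    have hn : ch.toNat = 97 + a := by omega
    calc ch = Char.ofNat ch.toNat := (Char.ofNat_toNat ch).symm
      _ = Char.ofNat (97 + a) := by rw [hn]
  · intro h
    subst h
    omega

theorem pv_main (S : String) : right_leftmost_idx S = right_leftmost_idx_alt S := by
  unfold right_leftmost_idx right_leftmost_idx_alt
  dsimp only
  rw [pvRowsA_eq, pvSTab_eq_map _ _ 0]
  apply List.map_congr_left
  intro k hk
  have hk' : k ≤ S.toList.length := by
    have := List.mem_range.mp hk
    omega
  unfold pvSRow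
  apply List.map_congr_left
  intro a ha
  have ha26 : a < 26 := List.mem_range.mp ha
  rw [if_pos ha26]
  rw [PySem.Str.findFrom_eq]
  have hff := PySem.Chars.findFrom_natCast S.toList (String.ofList [Char.ofNat (97 + a)]).toList k hk'
  simp only [hff]
  have hG := pvG_eq_find (Char.ofNat (97 + a)) (a : Int) (pvCode_iff a ha26)
      (S.toList.drop k) ((k : Int)) (S.toList.length : Int) (by rw [List.length_drop]; omega)
  have hsub : (String.ofList [Char.ofNat (97 + a)]).toList = [Char.ofNat (97 + a)] := by simp
  rw [hsub] at *
  rw [zero_add, hG]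
  by_cases hf : PySem.Chars.find (S.toList.drop k) [Char.ofNat (97 + a)] = -1
  · simp [hf]
  · have hnn := PySem.Chars.neg_one_le_find (S.toList.drop k) [Char.ofNat (97 + a)]
    rw [if_neg hf, if_neg hf, if_neg (by omega)]

-- ===== VERDICT (by name: the statement is the Claim_ definition above) =====
theorem right_leftmost_idx_spec : Claim_equal_right_leftmost_idx := by
  intro S _
  exact pv_main S
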